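-- pv_equiv track=rewrite | github.com/jyshtty/Scaler_DSA_intermidiate | 07_Problems_on_array/assignment/pattern_printing_02.py | pattern_printing
-- ===== SOURCE A (Python) =====
-- def pattern_printing(n):
--     ls = [[0 for i in range(n)] for j in range(n)]
--     for i in range(0,n):
--         j = n-1
--         for val in range(1,i+2):
--             ls[i][j] = val
--             j = j-1
--     return ls
-- ===== SOURCE B (Python) =====
-- def pattern_printing(n):
--     return [[n - j if i + j >= n - 1 else 0 for j in range(n)] for i in range(n)]
-- ===== Notes on version B (the rewrite author's own statement) =====
-- stated objective: simpler
-- what changed: Replaces the zero-initialization pass plus a per-row running counter that fills a growing suffix with a single comprehension computing each cell in closed form from its indices (n-j when i+j >= n-1, else 0).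
import Mathlib
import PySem

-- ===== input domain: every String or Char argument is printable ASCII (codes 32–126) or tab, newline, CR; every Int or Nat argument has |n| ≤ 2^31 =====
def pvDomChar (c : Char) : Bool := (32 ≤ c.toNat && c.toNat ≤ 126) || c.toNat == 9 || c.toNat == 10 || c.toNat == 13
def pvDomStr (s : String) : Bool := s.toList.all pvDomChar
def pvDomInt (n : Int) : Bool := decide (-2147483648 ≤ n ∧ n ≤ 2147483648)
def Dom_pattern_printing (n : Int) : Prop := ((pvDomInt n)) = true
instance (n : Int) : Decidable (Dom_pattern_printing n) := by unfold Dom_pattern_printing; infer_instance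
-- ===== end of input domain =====

-- B replaces A's zero-init pass + per-row running counter with a closed-form per-cell comprehension (simpler).

-- ===== PORT A =====
-- Python `row[j] = v`; the no-op branch is the IndexError case, which A never reaches (all writes are in range).
def pvSetA {α : Type} (xs : List α) (i : Int) (v : α) : List α :=
  if 0 ≤ i ∧ i < (xs.length : Int) then xs.set i.toNat v else xs

-- Python `ls[i][j] = v`: fetch row i, set its j-th entry in place.
def pvSet2A (ls : List (List Int)) (i j : Int) (v : Int) : List (List Int) :=
  if 0 ≤ i ∧ i < (ls.length : Int) then ls.set i.toNat (pvSetA (ls.getD i.toNat []) j v) else ls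

def pattern_printing (n : Int) : List (List Int) :=
  let ls := (PySem.List.pyRange 0 n 1).map (fun _j => (PySem.List.pyRange 0 n 1).map (fun _i => (0 : Int)))
  (PySem.List.pyRange 0 n 1).foldl (fun ls i =>
    ((PySem.List.pyRange 1 (i + 2) 1).foldl
        (fun (st : List (List Int) × Int) val => (pvSet2A st.1 i st.2 val, st.2 - 1))
        (ls, n - 1)).1) ls

-- ===== PORT B =====
def pattern_printing_alt (n : Int) : List (List Int) :=
  (PySem.List.pyRange 0 n 1).map (fun i =>
    (PySem.List.pyRange 0 n 1).map (fun j => if n - 1 ≤ i + j then n - j else 0))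

-- ===== PRECONDITION & SPEC =====
def Spec_pattern_printing (n : Int) (out : List (List Int)) : Prop := out = pattern_printing_alt n
instance (n : Int) (out : List (List Int)) : Decidable (Spec_pattern_printing n out) := by unfold Spec_pattern_printing; infer_instance

-- ===== CLAIM (what is proved, stated in full; the proofs are below) =====
def Claim_equal_pattern_printing : Prop := ∀ (n : Int), Dom_pattern_printing n → Spec_pattern_printing n (pattern_printing n)

-- ===== LEMMAS AND PROOFS =====

-- the inner `for val` loop, unrolled by number of iterations
def innerAux (i : Int) (ls : List (List Int)) (j0 : Int) : Nat → List (List Int) × Int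
  | 0 => (ls, j0)
  | m + 1 =>
      let p := innerAux i ls j0 m
      (pvSet2A p.1 i p.2 ((m : Int) + 1), p.2 - 1)

-- the effect of the inner loop on row i alone
def rowAux (row : List Int) (j0 : Int) : Nat → List Int
  | 0 => row
  | m + 1 => pvSetA (rowAux row j0 m) (j0 - m) ((m : Int) + 1)

lemma inner_fold (i j0 : Int) (ls : List (List Int)) (m : Nat) :
    (PySem.List.pyRange 1 (1 + (m : Int)) 1).foldl
        (fun (st : List (List Int) × Int) val => (pvSet2A st.1 i st.2 val, st.2 - 1)) (ls, j0)
      = innerAux i ls j0 m := by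
  induction m with
  | zero => simp [PySem.List.pyRange_one_eq_nil, innerAux]
  | succ m ih =>
      have h : (1 : Int) + (m + 1 : Nat) = (1 + (m : Int)) + 1 := by push_cast; ring
      rw [h, PySem.List.pyRange_one_succ_right (by omega), List.foldl_append, ih]
      simp [innerAux]
      congr 1 <;> push_cast <;> ring

lemma snd_innerAux (i j0 : Int) (ls : List (List Int)) (m : Nat) :
    (innerAux i ls j0 m).2 = j0 - m := by
  induction m with
  | zero => simp [innerAux]
  | succ m ih => simp [innerAux, ih]; push_cast; ring

lemma fst_innerAux (i j0 : Int) (ls : List (List Int)) (m : Nat)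
    (h0 : 0 ≤ i) (h1 : i < (ls.length : Int)) :
    (innerAux i ls j0 m).1 = ls.set i.toNat (rowAux (ls.getD i.toNat []) j0 m) := by
  have hk : i.toNat < ls.length := by omega
  induction m with
  | zero =>
      simp only [innerAux, rowAux]
      rw [List.getD_eq_getElem?_getD, List.getElem?_eq_getElem hk]
      simp
  | succ m ih =>
      simp only [innerAux, ih, snd_innerAux]
      rw [pvSet2A, if_pos (by simp [hk]; omega)]
      simp only [List.getD_eq_getElem?_getD]
      rw [List.getElem?_set_self (by simpa using hk), Option.getD_some, List.set_set]
      rfl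

lemma length_rowAux (row : List Int) (j0 : Int) (m : Nat) :
    (rowAux row j0 m).length = row.length := by
  induction m with
  | zero => rfl
  | succ m ih => simp only [rowAux, pvSetA]; split <;> simp [ih]

lemma getElem_rowAux (row : List Int) (j0 : Int) (m : Nat)
    (hm : (m : Int) ≤ j0 + 1) (hj0 : j0 < (row.length : Int))
    (c : Nat) (hc : c < row.length) :
    (rowAux row j0 m)[c]'(by rw [length_rowAux]; exact hc)
      = if j0 - m < (c : Int) ∧ (c : Int) ≤ j0 then j0 - c + 1 else row[c] := by
  induction m with
  | zero =>
      rw [if_neg (by omega)]; rfl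
  | succ m ih =>
      have hm' : (m : Int) ≤ j0 + 1 := by push_cast at hm ⊢; omega
      have hstep : rowAux row j0 (m + 1)
          = (rowAux row j0 m).set (j0 - (m : Int)).toNat ((m : Int) + 1) := by
        rw [rowAux, pvSetA,
          if_pos (by rw [length_rowAux]; push_cast at hm ⊢; omega)]
      simp only [hstep]
      rw [List.getElem_set, ih hm']
      push_cast at hm ⊢
      split_ifs <;> omega

def zRow (n : Int) : List Int := (PySem.List.pyRange 0 n 1).map (fun _i => (0 : Int))
def rowB (n i : Int) : List Int :=
  (PySem.List.pyRange 0 n 1).map (fun j => if n - 1 ≤ i + j then n - j else 0)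

lemma alt_eq (n : Int) : pattern_printing_alt n = (PySem.List.pyRange 0 n 1).map (rowB n) := rfl

lemma rowAux_zRow (n : Int) (hn : 0 < n) (K : Nat) (hK : (K : Int) < n) :
    rowAux (zRow n) (n - 1) (K + 1) = rowB n (K : Int) := by
  apply List.ext_getElem
  · simp [length_rowAux, zRow, rowB, PySem.List.length_pyRange_one]
  · intro c h1 h2
    have hc : c < (zRow n).length := by
      simpa [length_rowAux] using h1
    have hcn : (c : Int) < n := by
      have h := hc
      simp only [zRow, List.length_map, PySem.List.length_pyRange_one] at h
      omega
    rw [getElem_rowAux (zRow n) (n - 1) (K + 1) (by push_cast; omega)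
      (by simp only [zRow, List.length_map, PySem.List.length_pyRange_one]; omega) c hc]
    simp only [zRow, rowB, List.getElem_map, PySem.List.getElem_pyRange_one]
    push_cast
    split_ifs <;> omega

lemma outer_fold (n : Int) (hn : 0 < n) : ∀ (K : Nat), K ≤ n.toNat →
    (PySem.List.pyRange 0 (K : Int) 1).foldl
      (fun ls i => ((PySem.List.pyRange 1 (i + 2) 1).foldl
        (fun (st : List (List Int) × Int) val => (pvSet2A st.1 i st.2 val, st.2 - 1)) (ls, n - 1)).1)
      ((PySem.List.pyRange 0 n 1).map (fun _j => zRow n))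
    = (PySem.List.pyRange 0 n 1).map (fun r => if r < (K : Int) then rowB n r else zRow n) := by
  intro K
  induction K with
  | zero =>
      intro _
      have hnil : PySem.List.pyRange 0 ((0 : Nat) : Int) 1 = [] :=
        PySem.List.pyRange_one_eq_nil (by norm_num)
      rw [hnil, List.foldl_nil]
      apply List.map_congr_left
      intro r hr
      rw [PySem.List.mem_pyRange_one] at hr
      rw [if_neg (by omega)]
  | succ K ih =>
      intro hK
      have hKn : (K : Int) < n := by omega
      have h1 : ((K + 1 : Nat) : Int) = (K : Int) + 1 := by push_cast; ring
      rw [h1, PySem.List.pyRange_one_succ_right (by omega), List.foldl_append,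
        ih (by omega), List.foldl_cons, List.foldl_nil]
      have h2 : (K : Int) + 2 = 1 + ((K + 1 : Nat) : Int) := by push_cast; ring
      rw [h2, inner_fold]
      have hlen : ((PySem.List.pyRange 0 n 1).map
          (fun r => if r < (K : Int) then rowB n r else zRow n)).length = n.toNat := by
        simp [PySem.List.length_pyRange_one]
      rw [fst_innerAux _ _ _ _ (by omega) (by rw [hlen]; omega)]
      have hKlt : (K : Int).toNat < ((PySem.List.pyRange 0 n 1).map
          (fun r => if r < (K : Int) then rowB n r else zRow n)).length := by
        rw [hlen]; omega
      have hget : ((PySem.List.pyRange 0 n 1).map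
          (fun r => if r < (K : Int) then rowB n r else zRow n)).getD (K : Int).toNat [] = zRow n := by
        rw [List.getD_eq_getElem?_getD, List.getElem?_eq_getElem hKlt]
        simp only [List.getElem_map, PySem.List.getElem_pyRange_one, Option.getD_some]
        rw [if_neg (by push_cast; omega)]
      rw [hget, rowAux_zRow n hn K hKn]
      apply List.ext_getElem
      · simp [PySem.List.length_pyRange_one]
      · intro c hc1 hc2
        have hcN : c < n.toNat := by
          simpa [PySem.List.length_pyRange_one] using hc2
        rw [List.getElem_set]
        simp only [List.getElem_map, PySem.List.getElem_pyRange_one, zero_add]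
        by_cases hck : (K : Int).toNat = c
        · rw [if_pos hck, if_pos (by omega)]
          have : (K : Int) = (c : Int) := by omega
          rw [this]
        · rw [if_neg hck]
          split_ifs with hA hB hB
          · rfl
          · omega
          · omega
          · rfl

-- ===== VERDICT (by name: the statement is the Claim_ definition above) =====
theorem pattern_printing_spec : Claim_equal_pattern_printing := by
  intro n _
  show pattern_printing n = pattern_printing_alt n
  by_cases hn : n ≤ 0
  · simp [pattern_printing, pattern_printing_alt, PySem.List.pyRange_one_eq_nil hn]
  · rw [not_le] at hn
    have h0 : pattern_printing n = (PySem.List.pyRange 0 n 1).map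
        (fun r => if r < n then rowB n r else zRow n) := by
      have h := outer_fold n hn n.toNat le_rfl
      rw [Int.toNat_of_nonneg (le_of_lt hn)] at h
      simpa only [pattern_printing, zRow] using h
    rw [h0, alt_eq]
    apply List.map_congr_left
    intro r hr
    rw [PySem.List.mem_pyRange_one] at hr
    rw [if_pos hr.2]
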